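-- pv_equiv track=rewrite | github.com/MrBrantCode/unitest_baseline | mut_generate/mist_train_cf/cf_10751/solution.py | sum_even_product_odd
-- ===== SOURCE A (Python) =====
-- def sum_even_product_odd(number):
--     """
--     This function calculates the sum of all even numbers between 0 and the given number,
--     and returns the sum along with the product of all odd numbers in the same range.
--
--     Args:
--         number (int): The input number up to which the calculation is performed.
--
--     Returns:
--         tuple: A tuple containing the sum of even numbers and the product of odd numbers.
--     """
--     sum_even = 0
--     product_odd = 1
--
--     for i in range(1, number+1):
--         if i % 2 == 0:
--             sum_even += i
--         else:
--             product_odd *= i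
--
--     return sum_even, product_odd
-- ===== SOURCE B (Python) =====
-- def sum_even_product_odd(number):
--     k = max(number // 2, 0)
--     product_odd = 1
--     for i in range(1, number + 1, 2):
--         product_odd *= i
--     return k * (k + 1), product_odd
-- ===== Notes on version B (the rewrite author's own statement) =====
-- stated objective: simpler
-- what changed: Replaces the single scan with a parity branch by a closed-form triangular formula for the even sum (clamped at zero for non-positive inputs) plus a stride-two loop over only the odd values for the product.
import Mathlib
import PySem

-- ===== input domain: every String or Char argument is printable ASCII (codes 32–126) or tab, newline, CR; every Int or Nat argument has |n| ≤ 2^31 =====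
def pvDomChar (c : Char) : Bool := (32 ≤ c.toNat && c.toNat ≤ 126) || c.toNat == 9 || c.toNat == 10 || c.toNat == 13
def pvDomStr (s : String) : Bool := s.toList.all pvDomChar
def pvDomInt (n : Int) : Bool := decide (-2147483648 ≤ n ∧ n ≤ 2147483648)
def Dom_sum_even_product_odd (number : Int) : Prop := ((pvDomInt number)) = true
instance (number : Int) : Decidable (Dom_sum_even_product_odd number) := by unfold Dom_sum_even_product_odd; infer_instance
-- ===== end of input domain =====

-- B replaces the parity-branch scan by a closed-form even sum plus a stride-2 product loop (objective: simpler).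


-- ===== PORT A =====
-- one pass over range(1, number+1) carrying (sum_even, product_odd), branching on parity
def sum_even_product_odd (number : Int) : Int × Int :=
  (PySem.List.pyRange 1 (number + 1) 1).foldl
    (fun st i => if PySem.Int.mod i 2 = 0 then (st.1 + i, st.2) else (st.1, st.2 * i))
    (0, 1)

-- ===== PORT B =====
-- closed-form even sum; product over the odd values only (step-2 range)
def sum_even_product_odd_alt (number : Int) : Int × Int :=
  let k : Int := max (PySem.Int.floordiv number 2) 0
  let product_odd : Int := (PySem.List.pyRange 1 (number + 1) 2).foldl (fun p i => p * i) 1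
  (k * (k + 1), product_odd)

-- ===== PRECONDITION & SPEC =====
def Spec_sum_even_product_odd (number : Int) (out : Int × Int) : Prop := out = sum_even_product_odd_alt number
instance (number : Int) (out : Int × Int) : Decidable (Spec_sum_even_product_odd number out) := by unfold Spec_sum_even_product_odd; infer_instance

-- ===== CLAIM (what is proved, stated in full; the proofs are below) =====
def Claim_equal_sum_even_product_odd : Prop := ∀ (number : Int), Dom_sum_even_product_odd number → Spec_sum_even_product_odd number (sum_even_product_odd number)

-- ===== LEMMAS AND PROOFS =====

/-- even sum reference: 2+4+…+2⌊n/2⌋ = ⌊n/2⌋(⌊n/2⌋+1) -/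
def pvEn (n : Nat) : Int := ((n / 2 : Nat) : Int) * (((n / 2 : Nat) : Int) + 1)

/-- odd product reference, by structural recursion -/
def pvPn : Nat → Int
  | 0 => 1
  | n + 1 => if (n + 1) % 2 = 0 then pvPn n else pvPn n * ((n : Int) + 1)

theorem pvA_char (n : Nat) : sum_even_product_odd (n : Int) = (pvEn n, pvPn n) := by
  induction n with
  | zero =>
      simp [sum_even_product_odd, PySem.List.pyRange_one_eq_nil, pvEn, pvPn]
  | succ n ih =>
      have hb : (1 : Int) ≤ (n : Int) + 1 := by omega
      have hcast : ((n + 1 : Nat) : Int) + 1 = ((n : Int) + 1) + 1 := by push_cast; ring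
      unfold sum_even_product_odd at ih ⊢
      rw [hcast, PySem.List.pyRange_one_succ_right hb, List.foldl_append, ih]
      have hmod : PySem.Int.mod ((n : Int) + 1) 2 = (((n + 1) % 2 : Nat) : Int) := by
        exact_mod_cast PySem.Int.mod_natCast (n + 1) 2
      simp only [List.foldl_cons, List.foldl_nil, hmod]
      by_cases hpar : (n + 1) % 2 = 0
      · -- n+1 even: sum grows, product unchanged
        obtain ⟨m, hm⟩ : ∃ m, n + 1 = 2 * m := ⟨(n + 1) / 2, by omega⟩
        have hm1 : 1 ≤ m := by omega
        have h1 : (n + 1) / 2 = m := by omega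
        have h2 : n / 2 = m - 1 := by omega
        simp only [hpar, Nat.cast_zero, if_true, Prod.mk.injEq, pvPn, pvEn, h1, h2]
        refine ⟨?_, by simp⟩
        push_cast [Nat.cast_sub hm1]
        have hn : (n : Int) = 2 * (m : Int) - 1 := by omega
        rw [hn]; ring
      · have hpar1 : (n + 1) % 2 = 1 := by omega
        have h1 : (n + 1) / 2 = n / 2 := by omega
        have hne : (((n + 1) % 2 : Nat) : Int) ≠ 0 := by omega
        simp only [if_neg hne, pvPn, pvEn, h1, if_neg hpar]

theorem pvRange2_eq (n : Nat) :
    PySem.List.pyRange 1 ((n : Int) + 1) 2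
      = (List.range ((n + 1) / 2)).map (fun k : Nat => (1 : Int) + 2 * (k : Int)) := by
  rw [PySem.List.pyRange_of_pos 1 ((n : Int) + 1) (by norm_num)]
  have hc : (if (1:Int) < (n : Int) + 1 then (((n : Int) + 1 - 1 + 2 - 1) / 2).toNat else 0)
      = (n + 1) / 2 := by
    by_cases h : (1 : Int) < (n : Int) + 1
    · rw [if_pos h]; omega
    · rw [if_neg h]; omega
  rw [hc]

theorem pvB_prod (n : Nat) :
    ((List.range ((n + 1) / 2)).map (fun k : Nat => (1 : Int) + 2 * (k : Int))).foldl (fun p i => p * i) 1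
      = pvPn n := by
  induction n with
  | zero => simp [pvPn]
  | succ n ih =>
      by_cases hpar : (n + 1) % 2 = 0
      · -- n+1 even: count unchanged
        have h1 : (n + 1 + 1) / 2 = (n + 1) / 2 := by omega
        rw [h1, ih]
        simp [pvPn, hpar]
      · -- n+1 odd: one more factor, equal to n+1
        have h1 : (n + 1 + 1) / 2 = (n + 1) / 2 + 1 := by omega
        have h2 : (n + 1) / 2 = n / 2 := by omega
        rw [h1, List.range_succ, List.map_append, List.foldl_append, ih]
        simp only [List.map_cons, List.map_nil, List.foldl_cons, List.foldl_nil, pvPn,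
          if_neg hpar]
        congr 1
        have : ((n + 1) / 2 : Nat) = (n + 1) / 2 := rfl
        push_cast
        omega

theorem pvB_char (n : Nat) : sum_even_product_odd_alt (n : Int) = (pvEn n, pvPn n) := by
  unfold sum_even_product_odd_alt
  have hfd : PySem.Int.floordiv (n : Int) 2 = ((n / 2 : Nat) : Int) := by
    exact_mod_cast PySem.Int.floordiv_natCast n 2
  have hk : max (PySem.Int.floordiv (n : Int) 2) 0 = ((n / 2 : Nat) : Int) := by
    rw [hfd]; omega
  rw [pvRange2_eq, pvB_prod, hk]
  rfl

theorem pvNeg_case (number : Int) (h : number < 0) :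
    sum_even_product_odd number = sum_even_product_odd_alt number := by
  unfold sum_even_product_odd sum_even_product_odd_alt
  have hA : PySem.List.pyRange 1 (number + 1) 1 = [] :=
    PySem.List.pyRange_one_eq_nil (by omega)
  have hB : PySem.List.pyRange 1 (number + 1) 2 = [] := by
    rw [PySem.List.pyRange_of_pos 1 (number + 1) (by norm_num)]
    rw [if_neg (by omega)]
    simp
  have hk : max (PySem.Int.floordiv number 2) 0 = 0 := by
    rw [PySem.Int.floordiv_eq_ediv_of_pos (by norm_num)]
    omega
  rw [hA, hB, hk]
  simp

-- ===== VERDICT (by name: the statement is the Claim_ definition above) =====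
theorem sum_even_product_odd_spec : Claim_equal_sum_even_product_odd := by
  intro number _
  unfold Spec_sum_even_product_odd
  rcases Int.lt_or_le number 0 with hneg | hpos
  · exact pvNeg_case number hneg
  · obtain ⟨n, rfl⟩ := Int.eq_ofNat_of_zero_le hpos
    rw [pvA_char, pvB_char]
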